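-- pv_equiv track=rewrite | github.com/adarsh-3099/Daily-Dose-of-Data-Structures | Hashing/Sum of elements in an array with frequencies greater than or equal to that element.py | func
-- ===== SOURCE A (Python) =====
-- def func(arr, k):
--    d = {}
--    for i in range(len(arr)):
--        if arr[i] in d:
--            d[arr[i]] += 1
--        else:
--            d[arr[i]] = 1
--
--    s = 0
--    for i in d.keys():
--        if d[i] >= i:
--            s += i
--    return s
-- ===== SOURCE B (Python) =====
-- def func(arr, k):
--     a = sorted(arr)
--     s = 0
--     i = 0
--     n = len(a)
--     while i < n:
--         v = a[i]
--         j = i + 1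
--         while j < n and a[j] == v:
--             j += 1
--         if j - i >= v:
--             s += v
--         i = j
--     return s
-- ===== Notes on version B (the rewrite author's own statement) =====
-- stated objective: alternative
-- what changed: B sorts a copy of arr and does one linear sweep over maximal runs of equal elements (run length = frequency), instead of A's hash-table frequency count followed by a pass over the keys.
import Mathlib
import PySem

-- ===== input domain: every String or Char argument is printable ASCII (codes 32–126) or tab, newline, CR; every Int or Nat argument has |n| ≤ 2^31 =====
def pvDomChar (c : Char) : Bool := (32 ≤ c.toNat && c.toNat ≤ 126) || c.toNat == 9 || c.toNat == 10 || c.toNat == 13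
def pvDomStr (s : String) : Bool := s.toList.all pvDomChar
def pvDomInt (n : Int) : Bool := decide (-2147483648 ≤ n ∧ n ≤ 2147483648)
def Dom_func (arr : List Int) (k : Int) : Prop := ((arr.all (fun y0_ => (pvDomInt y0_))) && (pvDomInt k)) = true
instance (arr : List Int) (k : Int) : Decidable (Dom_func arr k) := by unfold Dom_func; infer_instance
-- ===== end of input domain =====

-- B replaces A's dict-of-frequencies by sort + run-length sweep: a different algorithm of similar cost (not claimed faster).

-- ===== PORT A =====
def func (arr : List Int) (k : Int) : Int :=
  -- d = {}; for i in range(len(arr)): if arr[i] in d: d[arr[i]] += 1 else: d[arr[i]] = 1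
  let d := (PySem.List.pyRange 0 (PySem.List.len arr) 1).foldl
    -- arr[i] = PySem.List.pyGetD arr i 0; i is always in range in this loop
    (fun d i =>
      if d.contains (PySem.List.pyGetD arr i 0) then
        d.insert (PySem.List.pyGetD arr i 0) (d.getD (PySem.List.pyGetD arr i 0) 0 + 1)
      else d.insert (PySem.List.pyGetD arr i 0) 1)
    PySem.Dict.empty
  -- s = 0; for i in d.keys(): if d[i] >= i: s += i
  d.keys.foldl (fun s i => if d.getD i 0 ≥ i then s + i else s) 0  -- d[i]: i ∈ keys, so getD is exact

-- ===== PORT B =====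
-- while i < n: scan j past the maximal run of a[i]; if run length >= a[i]: s += a[i]; i = j
def funcAltGo : List Int → Int → Int
  | [], s => s
  | x :: xs, s =>
    let run : Int := 1 + ((xs.takeWhile (fun y => y == x)).length : Int)
    funcAltGo (xs.dropWhile (fun y => y == x)) (if run ≥ x then s + x else s)  -- i = j: continue after the run
termination_by l _ => l.length
decreasing_by simp; exact List.length_dropWhile_le _ _

def func_alt (arr : List Int) (k : Int) : Int :=
  funcAltGo (PySem.List.sorted arr (fun x => x) false) 0

-- ===== PRECONDITION & SPEC =====
def Spec_func (arr : List Int) (k : Int) (out : Int) : Prop := out = func_alt arr k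
instance (arr : List Int) (k : Int) (out : Int) : Decidable (Spec_func arr k out) := by unfold Spec_func; infer_instance

-- ===== CLAIM (what is proved, stated in full; the proofs are below) =====
def Claim_equal_func : Prop := ∀ (arr : List Int) (k : Int), Dom_func arr k → Spec_func arr k (func arr k)

-- ===== LEMMAS AND PROOFS =====

-- the common semantic value: sum, over the distinct elements of a, of v when a.count v ≥ v
def gOf (a : List Int) (v : Int) : Int := if (a.count v : Int) ≥ v then v else 0
def FOf (a : List Int) : Int := ((PySem.Set.ofList a).map (gOf a)).sum

theorem func_eq_FOf (arr : List Int) (k : Int) : func arr k = FOf arr := by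
  unfold func
  have h1 : (PySem.List.pyRange 0 (PySem.List.len arr) 1).foldl
      (fun d i =>
        if d.contains (PySem.List.pyGetD arr i 0) then
          d.insert (PySem.List.pyGetD arr i 0) (d.getD (PySem.List.pyGetD arr i 0) 0 + 1)
        else d.insert (PySem.List.pyGetD arr i 0) 1)
      PySem.Dict.empty = PySem.Dict.counter arr := by
    rw [PySem.List.foldl_pyRange_pyGetD arr 0
      (fun d x => if PySem.Dict.contains d x then d.insert x (d.getD x 0 + 1) else d.insert x 1)
      PySem.Dict.empty (by norm_num)]
    simp only [Int.toNat_zero, List.drop_zero]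
    rw [PySem.List.foldl_congr_mem
      (g := fun d x => PySem.Dict.insert d x (PySem.Dict.getD d x 0 + 1))]
    · exact PySem.Dict.foldl_insert_getD_add_one_eq_counter arr
    · intro d x _
      by_cases h : PySem.Dict.contains d x = true
      · simp [h]
      · have h0 : PySem.Dict.getD d x 0 = 0 := by
          rw [PySem.Dict.getD_of_not_contains]
          simpa using h
        simp [h, h0]
  simp only [h1]
  rw [PySem.List.foldl_congr_mem
    (g := fun s i => s + gOf arr i)]
  · rw [PySem.List.foldl_add]
    simp [FOf, PySem.Dict.keys_counter]
  · intro s i _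
    simp only [PySem.Dict.getD_counter, gOf]
    split_ifs <;> simp

theorem not_mem_dropWhile_of_pairwise (l : List Int) (x : Int)
    (hp : l.Pairwise (· ≤ ·)) (hle : ∀ y ∈ l, x ≤ y) :
    x ∉ l.dropWhile (fun y => y == x) := by
  induction l with
  | nil => simp
  | cons y ys ih =>
    rcases List.pairwise_cons.mp hp with ⟨hy, hys⟩
    rw [List.dropWhile_cons]
    by_cases h : y = x
    · subst h
      simp only [BEq.rfl, if_true]
      exact ih hys (fun z hz => hle z (List.mem_cons_of_mem _ hz))
    · have hbeq : (y == x) = false := by simp [h]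
      simp only [hbeq]
      intro hmem
      rcases List.mem_cons.mp hmem with h1 | h1
      · exact h h1.symm
      · exact h (le_antisymm (hle y (List.mem_cons_self)) (hy x h1)).symm

theorem FOf_cons_run (x : Int) (xs : List Int) (hp : (x :: xs).Pairwise (· ≤ ·)) :
    FOf (x :: xs) =
      (if (1 + ((xs.takeWhile (fun y => y == x)).length : Int)) ≥ x then x else 0)
        + FOf (xs.dropWhile (fun y => y == x)) := by
  rcases List.pairwise_cons.mp hp with ⟨hxle, hxs⟩
  set t := xs.takeWhile (fun y => y == x) with ht
  set d := xs.dropWhile (fun y => y == x) with hd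
  have hsplit : t ++ d = xs := List.takeWhile_append_dropWhile
  have htx : ∀ y ∈ t, y = x := by
    intro y hy
    have := List.mem_takeWhile_imp hy
    simpa using this
  have hxd : x ∉ d := not_mem_dropWhile_of_pairwise xs x hxs hxle
  have hdmem : ∀ v ∈ d, v ∈ xs := by
    intro v hv; rw [← hsplit]; exact List.mem_append_right _ hv
  have hcount_x : ((x :: xs).count x : Int) = 1 + (t.length : Int) := by
    have h1 : xs.count x = t.length := by
      rw [← hsplit, List.count_append]
      have h2 : t.count x = t.length := List.count_eq_length.mpr (fun b hb => by simp [htx b hb])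
      have h3 : d.count x = 0 := List.count_eq_zero.mpr hxd
      omega
    rw [List.count_cons_self]
    push_cast [h1]
    ring
  have hcount_ne : ∀ v, v ≠ x → (x :: xs).count v = d.count v := by
    intro v hv
    have h2 : t.count v = 0 := List.count_eq_zero.mpr (fun hvt => hv (htx v hvt))
    have h3 : (x :: xs).count v = xs.count v := by simp [Ne.symm hv]
    rw [h3, ← hsplit, List.count_append, h2]
    omega
  have hnodup2 : (x :: PySem.Set.ofList d).Nodup := by
    refine List.nodup_cons.mpr ⟨?_, PySem.Set.nodup_ofList _⟩
    simpa [PySem.Set.mem_ofList] using hxd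
  have hperm : (PySem.Set.ofList (x :: xs)).Perm (x :: PySem.Set.ofList d) := by
    refine (List.perm_ext_iff_of_nodup (PySem.Set.nodup_ofList _) hnodup2).mpr ?_
    intro v
    simp only [PySem.Set.mem_ofList, List.mem_cons]
    constructor
    · rintro (rfl | hv)
      · left; rfl
      · rw [← hsplit] at hv
        rcases List.mem_append.mp hv with h1 | h1
        · left; exact htx v h1
        · right; simpa [PySem.Set.mem_ofList] using h1
    · rintro (rfl | hv)
      · left; rfl
      · right; exact hdmem v (by simpa [PySem.Set.mem_ofList] using hv)
  have hgx : gOf (x :: xs) x = (if (1 + (t.length : Int)) ≥ x then x else 0) := by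
    simp only [gOf, hcount_x]
  have hsum : FOf (x :: xs) = ((x :: PySem.Set.ofList d).map (gOf (x :: xs))).sum :=
    (hperm.map _).sum_eq
  rw [hsum, List.map_cons, List.sum_cons, hgx]
  congr 1
  have hmapeq : (PySem.Set.ofList d).map (gOf (x :: xs)) = (PySem.Set.ofList d).map (gOf d) := by
    refine List.map_congr_left ?_
    intro v hv
    have hvd : v ∈ d := by simpa [PySem.Set.mem_ofList] using hv
    have hvx : v ≠ x := fun h => hxd (h ▸ hvd)
    simp only [gOf, hcount_ne v hvx]
  rw [hmapeq]; rfl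

theorem funcAltGo_eq_aux : ∀ (n : Nat) (a : List Int), a.length ≤ n → a.Pairwise (· ≤ ·) →
    ∀ s, funcAltGo a s = s + FOf a := by
  intro n
  induction n with
  | zero =>
    intro a ha _ s
    have : a = [] := List.eq_nil_of_length_eq_zero (Nat.le_zero.mp ha)
    subst this
    simp [funcAltGo, FOf, PySem.Set.ofList]
  | succ n ih =>
    intro a ha hp s
    match a with
    | [] => simp [funcAltGo, FOf, PySem.Set.ofList]
    | x :: xs =>
      rw [funcAltGo]
      have hdp : (xs.dropWhile (fun y => y == x)).Pairwise (· ≤ ·) :=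
        (List.pairwise_cons.mp hp).2.sublist (List.dropWhile_sublist _)
      have hlen : (xs.dropWhile (fun y => y == x)).length ≤ n := by
        have := List.length_dropWhile_le (fun y => y == x) xs
        simp at ha
        omega
      rw [ih _ hlen hdp]
      rw [FOf_cons_run x xs hp]
      split_ifs <;> ring

theorem funcAltGo_eq (a : List Int) (hp : a.Pairwise (· ≤ ·)) :
    ∀ s, funcAltGo a s = s + FOf a :=
  funcAltGo_eq_aux a.length a le_rfl hp

theorem FOf_perm (a b : List Int) (h : a.Perm b) : FOf a = FOf b := by
  have hg : gOf a = gOf b := funext fun v => by simp [gOf, h.count_eq]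
  have hperm : (PySem.Set.ofList a).Perm (PySem.Set.ofList b) :=
    (List.perm_ext_iff_of_nodup (PySem.Set.nodup_ofList _) (PySem.Set.nodup_ofList _)).mpr
      (fun v => by simp [PySem.Set.mem_ofList, h.mem_iff])
  unfold FOf
  rw [hg]
  exact (hperm.map _).sum_eq

-- ===== VERDICT (by name: the statement is the Claim_ definition above) =====
theorem func_spec : Claim_equal_func := by
  intro arr k _
  unfold Spec_func func_alt
  rw [func_eq_FOf arr k,
    funcAltGo_eq _ (by simpa using PySem.List.sorted_pairwise (xs := arr) (key := fun x => x)) 0,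
    FOf_perm _ _ (PySem.List.sorted_perm (xs := arr) (key := fun x => x) (rev := false))]
  simp
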